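-- pv_equiv track=rewrite | github.com/bojesomo/Traffic4Cast2021-SwinUNet3D | fast_hypercomplex/utils.py | hmult
-- ===== SOURCE A (Python) =====
-- def hstar(h):
--     h_out = [h[0]]
--     for h_ in h[1:]:
--         h_ = '-' + h_
--         h_out.append(h_)
--     return h_out
--
-- def hmult(h1, h2):
--     assert len(h1) == len(h2)
--     n = len(h1)
--     ha, hb = h1[:len(h1) // 2], h1[len(h1) // 2:]
--     hc, hd = h2[:len(h1) // 2], h2[len(h1) // 2:]
--     if n > 2:  # do recursion
--         ac = hmult(ha, hc)
--         db = hmult(hstar(hd), hb)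
--
--         da = hmult(hd, ha)
--         bc = hmult(hb, hstar(hc))
--     else:  # end recursion
--         ac = [x_ + y_ for (x_, y_) in zip(ha, hc)]
--         db = [x_ + y_ for (x_, y_) in zip(hstar(hd), hb)]
--
--         da = [x_ + y_ for (x_, y_) in zip(hd, ha)]
--         bc = [x_ + y_ for (x_, y_) in zip(hb, hstar(hc))]
--
--     hm_a = [f"{x_} {' '.join([f'-{t}' for t in y_.split()])}" for (x_, y_) in zip(ac, db)]
--     hm_a.extend([f"{x_} {y_}" for (x_, y_) in zip(da, bc)])
--     return hm_a
-- ===== SOURCE B (Python) =====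
-- def hstar(h):
--     return [h[0]] + ['-' + x for x in h[1:]]
--
--
-- def _neg(y):
--     return ' '.join('-' + t for t in y.split())
--
--
-- def _combine(ac, db, da, bc):
--     out = [f"{x_} {_neg(y_)}" for x_, y_ in zip(ac, db)]
--     out += [f"{x_} {y_}" for x_, y_ in zip(da, bc)]
--     return out
--
--
-- def hmult(h1, h2):
--     assert len(h1) == len(h2)
--     # explicit post-order stack machine instead of call recursion;
--     # None on the work stack marks a pending combine of the last four results
--     work = [(h1, h2)]
--     results = []
--     while work:
--         t = work.pop()
--         if t is None:
--             bc = results.pop(); da = results.pop()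
--             db = results.pop(); ac = results.pop()
--             results.append(_combine(ac, db, da, bc))
--         else:
--             a, b = t
--             m = len(a) // 2
--             ha, hb = a[:m], a[m:]
--             hc, hd = b[:m], b[m:]
--             if len(a) > 2:
--                 work.append(None)
--                 work.append((hb, hstar(hc)))
--                 work.append((hd, ha))
--                 work.append((hstar(hd), hb))
--                 work.append((ha, hc))
--             else:
--                 ac = [x_ + y_ for x_, y_ in zip(ha, hc)]
--                 db = [x_ + y_ for x_, y_ in zip(hstar(hd), hb)]
--                 da = [x_ + y_ for x_, y_ in zip(hd, ha)]
--                 bc = [x_ + y_ for x_, y_ in zip(hb, hstar(hc))]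
--                 results.append(_combine(ac, db, da, bc))
--     return results.pop()
-- ===== Notes on version B (the rewrite author's own statement) =====
-- stated objective: alternative
-- what changed: The call recursion is replaced by an explicit post-order stack machine: a work stack of pending sub-multiplications plus a combine marker and a results stack, evaluated in a single while loop with the same base case and combine, producing byte-identical strings.
import Mathlib
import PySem

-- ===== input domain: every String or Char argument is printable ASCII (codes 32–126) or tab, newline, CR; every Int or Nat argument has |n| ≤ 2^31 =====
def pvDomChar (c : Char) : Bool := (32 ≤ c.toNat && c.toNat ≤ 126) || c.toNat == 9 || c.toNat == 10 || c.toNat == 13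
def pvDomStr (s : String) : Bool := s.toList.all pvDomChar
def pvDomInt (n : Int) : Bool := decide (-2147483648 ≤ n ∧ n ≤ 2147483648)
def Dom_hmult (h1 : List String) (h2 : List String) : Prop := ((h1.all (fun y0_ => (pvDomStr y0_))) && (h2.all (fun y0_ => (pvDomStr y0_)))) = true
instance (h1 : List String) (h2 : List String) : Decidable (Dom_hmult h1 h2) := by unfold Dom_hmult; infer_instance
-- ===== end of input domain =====

-- B replaces A's call recursion by an explicit post-order stack machine over the same
-- divide-and-conquer (objective: alternative decomposition, same cost; same results byte-for-byte).

-- ===== PORT A =====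

-- hstar: Python does h[0] first, which raises IndexError on []; the empty case is
-- unreachable under Pre_hmult (every sublist reached is nonempty there).
def hstarA (h : List String) : List String :=
  match h with
  | [] => []
  | h0 :: rest => h0 :: rest.map (fun s => "-" ++ s)

-- ' '.join([f'-{t}' for t in y.split()])
def negTokens (y : String) : String :=
  PySem.Str.join " " ((PySem.Str.split₀ y).map (fun t => "-" ++ t))

theorem hstarA_length (h : List String) : (hstarA h).length = h.length := by
  cases h <;> simp [hstarA]

def hmult (h1 : List String) (h2 : List String) : List String :=
  -- Python: assert len(h1)==len(h2) (raises on mismatch; excluded by Pre_hmult)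
  let n := h1.length
  let ha := h1.take (n / 2)
  let hb := h1.drop (n / 2)
  let hc := h2.take (n / 2)
  let hd := h2.drop (n / 2)
  if n > 2 then
    let ac := hmult ha hc
    let db := hmult (hstarA hd) hb
    let da := hmult hd ha
    let bc := hmult hb (hstarA hc)
    (ac.zip db).map (fun p => p.1 ++ " " ++ negTokens p.2)
      ++ (da.zip bc).map (fun p => p.1 ++ " " ++ p.2)
  else
    let ac := (ha.zip hc).map (fun p => p.1 ++ p.2)
    let db := ((hstarA hd).zip hb).map (fun p => p.1 ++ p.2)
    let da := (hd.zip ha).map (fun p => p.1 ++ p.2)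
    let bc := (hb.zip (hstarA hc)).map (fun p => p.1 ++ p.2)
    (ac.zip db).map (fun p => p.1 ++ " " ++ negTokens p.2)
      ++ (da.zip bc).map (fun p => p.1 ++ " " ++ p.2)
termination_by h1.length + h2.length
decreasing_by
  all_goals simp only [List.length_take, List.length_drop, hstarA_length]
  all_goals omega

-- ===== PORT B =====

def hstarB (h : List String) : List String :=
  match h with
  | [] => []   -- Python B's hstar also indexes h[0] (IndexError on []; unreachable under Pre_)
  | h0 :: rest => h0 :: rest.map (fun s => "-" ++ s)

-- _combine(ac, db, da, bc)
def hcombine (ac db da bc : List String) : List String :=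
  (ac.zip db).map (fun p => p.1 ++ " " ++ negTokens p.2)
    ++ (da.zip bc).map (fun p => p.1 ++ " " ++ p.2)

-- work-stack items: a pending sub-multiplication, or the combine marker (Python's None)
inductive HTask where
  | mul (a b : List String) : HTask
  | comb : HTask

-- fuel bound on the number of machine steps (the Python while-loop needs none)
def stepsFor (n : Nat) : Nat :=
  if n ≤ 2 then 1 else 2 + 4 * stepsFor (n / 2)
termination_by n
decreasing_by omega

-- the while-loop: pop a task, either expand it / solve the base case, or combine
def runB : Nat → List HTask → List (List String) → List (List String)
  | _, [], results => results
  | 0, _ :: _, results => results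
  | fuel + 1, HTask.comb :: work, results =>
    match results with
    | bc :: da :: db :: ac :: rest => runB fuel work (hcombine ac db da bc :: rest)
    | _ => []   -- never reached: the stack discipline always leaves four results for comb
  | fuel + 1, HTask.mul a b :: work, results =>
    let m := a.length / 2
    let ha := a.take m
    let hb := a.drop m
    let hc := b.take m
    let hd := b.drop m
    if a.length > 2 then
      runB fuel (HTask.mul ha hc :: HTask.mul (hstarB hd) hb :: HTask.mul hd ha ::
                 HTask.mul hb (hstarB hc) :: HTask.comb :: work) results
    else
      let ac := (ha.zip hc).map (fun p => p.1 ++ p.2)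
      let db := ((hstarB hd).zip hb).map (fun p => p.1 ++ p.2)
      let da := (hd.zip ha).map (fun p => p.1 ++ p.2)
      let bc := (hb.zip (hstarB hc)).map (fun p => p.1 ++ p.2)
      runB fuel work (hcombine ac db da bc :: results)

def hmult_alt (h1 : List String) (h2 : List String) : List String :=
  -- Python: assert len(h1)==len(h2) (raises on mismatch; excluded by Pre_hmult)
  (runB (stepsFor h1.length) [HTask.mul h1 h2] []).headD []

-- ===== PRECONDITION & SPEC =====

-- Pre_ = exactly the inputs where A returns: equal lengths that are a power of two ≥ 2.
-- Elsewhere A raises (AssertionError on a length mismatch or on the odd split an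
-- un-power-of-two length eventually produces; IndexError via hstar([]) when n ≤ 1).
def Pre_hmult (h1 : List String) (h2 : List String) : Prop :=
  h1.length = h2.length ∧ ∃ k < h1.length, h1.length = 2 ^ (k + 1)
instance (h1 : List String) (h2 : List String) : Decidable (Pre_hmult h1 h2) := by
  unfold Pre_hmult; infer_instance

def pvWitness_hmult : List String × List String := (["a", "b"], ["c", "d"])

def Spec_hmult (h1 : List String) (h2 : List String) (out : List String) : Prop := out = hmult_alt h1 h2
instance (h1 : List String) (h2 : List String) (out : List String) : Decidable (Spec_hmult h1 h2 out) := by unfold Spec_hmult; infer_instance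

-- ===== CLAIM (what is proved, stated in full; the proofs are below) =====
def Claim_equal_hmult : Prop := ∀ (h1 : List String) (h2 : List String), Dom_hmult h1 h2 → Pre_hmult h1 h2 → Spec_hmult h1 h2 (hmult h1 h2)

-- ===== LEMMAS AND PROOFS =====

theorem hstarB_eq_hstarA (h : List String) : hstarB h = hstarA h := by
  cases h <;> rfl

theorem stepsFor_base : stepsFor 2 = 1 := by
  rw [stepsFor]; simp

theorem stepsFor_rec (n : Nat) (hn : 2 < n) : stepsFor n = 2 + 4 * stepsFor (n / 2) := by
  rw [stepsFor, if_neg (by omega)]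

-- one machine step on a base-size mul task
theorem runB_step_base (fuel : Nat) (a b : List String) (W : List HTask)
    (R : List (List String)) (h : ¬ a.length > 2) :
    runB (fuel + 1) (HTask.mul a b :: W) R =
      runB fuel W
        (hcombine (((a.take (a.length / 2)).zip (b.take (a.length / 2))).map (fun p => p.1 ++ p.2))
          (((hstarB (b.drop (a.length / 2))).zip (a.drop (a.length / 2))).map (fun p => p.1 ++ p.2))
          (((b.drop (a.length / 2)).zip (a.take (a.length / 2))).map (fun p => p.1 ++ p.2))
          (((a.drop (a.length / 2)).zip (hstarB (b.take (a.length / 2)))).map (fun p => p.1 ++ p.2)) :: R) := by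
  simp only [runB, if_neg h]

-- one machine step on a big mul task
theorem runB_step_big (fuel : Nat) (a b : List String) (W : List HTask)
    (R : List (List String)) (h : a.length > 2) :
    runB (fuel + 1) (HTask.mul a b :: W) R =
      runB fuel (HTask.mul (a.take (a.length / 2)) (b.take (a.length / 2)) ::
                 HTask.mul (hstarB (b.drop (a.length / 2))) (a.drop (a.length / 2)) ::
                 HTask.mul (b.drop (a.length / 2)) (a.take (a.length / 2)) ::
                 HTask.mul (a.drop (a.length / 2)) (hstarB (b.take (a.length / 2))) ::
                 HTask.comb :: W) R := by
  simp only [runB, if_pos h]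

-- one machine step on a combine marker
theorem runB_step_comb (fuel : Nat) (W : List HTask) (ac db da bc : List String)
    (R : List (List String)) :
    runB (fuel + 1) (HTask.comb :: W) (bc :: da :: db :: ac :: R) =
      runB fuel W (hcombine ac db da bc :: R) := by
  simp only [runB]

-- A's recursion equations, written with the combine
theorem hmult_base (h1 h2 : List String) (h : ¬ h1.length > 2) :
    hmult h1 h2 =
      hcombine (((h1.take (h1.length / 2)).zip (h2.take (h1.length / 2))).map (fun p => p.1 ++ p.2))
        (((hstarA (h2.drop (h1.length / 2))).zip (h1.drop (h1.length / 2))).map (fun p => p.1 ++ p.2))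
        (((h2.drop (h1.length / 2)).zip (h1.take (h1.length / 2))).map (fun p => p.1 ++ p.2))
        (((h1.drop (h1.length / 2)).zip (hstarA (h2.take (h1.length / 2)))).map (fun p => p.1 ++ p.2)) := by
  rw [hmult, if_neg h]; rfl

theorem hmult_big (h1 h2 : List String) (h : h1.length > 2) :
    hmult h1 h2 =
      hcombine (hmult (h1.take (h1.length / 2)) (h2.take (h1.length / 2)))
        (hmult (hstarA (h2.drop (h1.length / 2))) (h1.drop (h1.length / 2)))
        (hmult (h2.drop (h1.length / 2)) (h1.take (h1.length / 2)))
        (hmult (h1.drop (h1.length / 2)) (hstarA (h2.take (h1.length / 2)))) := by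
  rw [hmult, if_pos h]; rfl

-- the machine processes one mul task exactly as A's recursion evaluates it
theorem runB_mul (k : Nat) :
    ∀ (a b : List String) (W : List HTask) (R : List (List String)) (f : Nat),
      a.length = 2 ^ (k + 1) → b.length = 2 ^ (k + 1) →
      runB (stepsFor a.length + f) (HTask.mul a b :: W) R = runB f W (hmult a b :: R) := by
  induction k with
  | zero =>
    intro a b W R f ha hb
    have ha2 : a.length = 2 := by simpa using ha
    rw [ha2, stepsFor_base, Nat.add_comm 1 f,
        runB_step_base f a b W R (by omega),
        hmult_base a b (by omega)]
    rw [hstarB_eq_hstarA, hstarB_eq_hstarA]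
  | succ k ih =>
    intro a b W R f ha hb
    have p1 : 1 ≤ 2 ^ k := Nat.one_le_two_pow
    have e4 : (2 : Nat) ^ (k + 1 + 1) = 2 ^ k * 4 := by ring
    have e2 : (2 : Nat) ^ (k + 1 + 1) = 2 ^ (k + 1) * 2 := by ring
    have hgt : a.length > 2 := by omega
    have hhalf : a.length / 2 = 2 ^ (k + 1) := by omega
    set S := stepsFor (a.length / 2) with hSdef
    have l1 : (a.take (a.length / 2)).length = 2 ^ (k + 1) := by
      simp only [List.length_take]; omega
    have l2 : (a.drop (a.length / 2)).length = 2 ^ (k + 1) := by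
      simp only [List.length_drop]; omega
    have l3 : (b.take (a.length / 2)).length = 2 ^ (k + 1) := by
      simp only [List.length_take]; omega
    have l4 : (b.drop (a.length / 2)).length = 2 ^ (k + 1) := by
      simp only [List.length_drop]; omega
    have hl2 : (hstarB (b.drop (a.length / 2))).length = 2 ^ (k + 1) := by
      rw [hstarB_eq_hstarA, hstarA_length]; exact l4
    have hl4 : (hstarB (b.take (a.length / 2))).length = 2 ^ (k + 1) := by
      rw [hstarB_eq_hstarA, hstarA_length]; exact l3
    have harith : stepsFor a.length + f = (S + (S + (S + (S + (f + 1))))) + 1 := by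
      rw [stepsFor_rec a.length hgt, hSdef]; ring
    rw [harith, runB_step_big _ a b W R hgt]
    rw [show S + (S + (S + (S + (f + 1)))) =
          stepsFor (a.take (a.length / 2)).length + (S + (S + (S + (f + 1)))) by rw [l1, ← hhalf]]
    rw [ih _ _ _ _ _ l1 l3]
    rw [show S + (S + (S + (f + 1))) =
          stepsFor (hstarB (b.drop (a.length / 2))).length + (S + (S + (f + 1))) by rw [hl2, ← hhalf]]
    rw [ih _ _ _ _ _ hl2 l2]
    rw [show S + (S + (f + 1)) =
          stepsFor (b.drop (a.length / 2)).length + (S + (f + 1)) by rw [l4, ← hhalf]]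
    rw [ih _ _ _ _ _ l4 l1]
    rw [show S + (f + 1) =
          stepsFor (a.drop (a.length / 2)).length + (f + 1) by rw [l2, ← hhalf]]
    rw [ih _ _ _ _ _ l2 hl4]
    rw [runB_step_comb, hmult_big a b hgt]
    rw [hstarB_eq_hstarA, hstarB_eq_hstarA]

-- ===== VERDICT (by name: the statement is the Claim_ definition above) =====
theorem hmult_spec : Claim_equal_hmult := by
  intro h1 h2 _dom pre
  obtain ⟨hlen, k, _, hk⟩ := pre
  show hmult h1 h2 = hmult_alt h1 h2
  unfold hmult_alt
  have := runB_mul k h1 h2 [] [] 0 hk (hlen ▸ hk)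
  rw [Nat.add_zero] at this
  rw [this, runB]
  rfl
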